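-- pv_equiv track=rewrite | github.com/seho27060/nov-algo-study | 1130/1130_dooo.py | solution
-- ===== SOURCE A (Python) =====
-- def solution(n, left, right):
--     answer = []
--     for i in range(left, right+1):
--         stand = (i//n) + 1
--         indata = i%n + 1
--         if stand < indata:
--             answer.append(indata)
--         else:
--             answer.append(stand)
--     return answer
-- ===== SOURCE B (Python) =====
-- def solution(n, left, right):
--     # Row-segment construction: for each grid row r in [left//n, right//n], the cells
--     # in the clamped column window take value r+1 (cols <= r) then col+1 (cols > r).
--     first, last = left // n, right // n
--     out = []
--     for r in range(first, last + 1):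
--         lo = left % n if r == first else 0
--         hi = right % n if r == last else n - 1
--         out.extend([r + 1] * (min(hi, r) - lo + 1))
--         out.extend(range(max(lo, r + 1) + 1, hi + 2))
--     return out
-- ===== Notes on version B (the rewrite author's own statement) =====
-- stated objective: alternative
-- what changed: Instead of computing (i//n)+1 and i%n+1 for every index, B iterates only over the grid rows left//n..right//n and emits each row's clamped column window as a constant block [r+1]*k followed by an ascending range of col+1 values.
-- outside the precondition, e.g. on solution(-2, 0, 3): A returns [1, 0, 1, 0], B returns []; on solution(0, 0, 3): A raises ZeroDivisionError, B raises ZeroDivisionError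
import Mathlib
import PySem

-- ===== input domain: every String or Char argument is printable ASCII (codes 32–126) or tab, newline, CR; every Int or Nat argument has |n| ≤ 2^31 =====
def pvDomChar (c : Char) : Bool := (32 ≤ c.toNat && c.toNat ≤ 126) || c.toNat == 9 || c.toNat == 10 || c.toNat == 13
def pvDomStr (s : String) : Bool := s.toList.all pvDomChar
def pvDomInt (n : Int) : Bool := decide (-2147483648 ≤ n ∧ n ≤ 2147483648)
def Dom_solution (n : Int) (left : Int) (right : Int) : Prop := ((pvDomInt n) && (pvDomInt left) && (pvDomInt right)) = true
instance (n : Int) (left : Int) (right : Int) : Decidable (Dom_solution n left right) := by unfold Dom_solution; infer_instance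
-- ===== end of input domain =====

-- B replaces A's per-index loop by per-row segment emission (constant block then ascending tail); same results, different decomposition.

-- ===== PORT A =====
def solution (n : Int) (left : Int) (right : Int) : List Int :=
  (PySem.List.pyRange left (right + 1) 1).foldl (fun answer i =>
    let stand := PySem.Int.floordiv i n + 1
    let indata := PySem.Int.mod i n + 1
    if stand < indata then answer ++ [indata] else answer ++ [stand]) []

-- ===== PORT B =====
def solution_alt (n : Int) (left : Int) (right : Int) : List Int :=
  let first := PySem.Int.floordiv left n
  let last := PySem.Int.floordiv right n
  (PySem.List.pyRange first (last + 1) 1).foldl (fun out r =>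
    let lo := if r = first then PySem.Int.mod left n else 0
    let hi := if r = last then PySem.Int.mod right n else n - 1
    (out ++ List.replicate (min hi r - lo + 1).toNat (r + 1)) ++
      PySem.List.pyRange (max lo (r + 1) + 1) (hi + 2) 1) []

-- ===== PRECONDITION & SPEC =====
-- Pre_ restricts to the natural domain of a grid width, n ≥ 1: A raises ZeroDivisionError at
-- n = 0, and for n < 0 A's values (from Python's divisor-signed floor division) are artefacts
-- outside the problem's domain, which B does not reproduce.
def Pre_solution (n : Int) (left : Int) (right : Int) : Prop := 0 < n
instance (n : Int) (left : Int) (right : Int) : Decidable (Pre_solution n left right) := by unfold Pre_solution; infer_instance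
def pvWitness_solution : Int × Int × Int := (3, 2, 10)
def Spec_solution (n : Int) (left : Int) (right : Int) (out : List Int) : Prop := out = solution_alt n left right
instance (n : Int) (left : Int) (right : Int) (out : List Int) : Decidable (Spec_solution n left right out) := by unfold Spec_solution; infer_instance

-- ===== CLAIM (what is proved, stated in full; the proofs are below) =====
def Claim_equal_solution : Prop := ∀ (n : Int) (left : Int) (right : Int), Dom_solution n left right → Pre_solution n left right → Spec_solution n left right (solution n left right)

-- ===== LEMMAS AND PROOFS =====

-- the per-index value A computes
def fA (n i : Int) : Int :=
  if PySem.Int.floordiv i n + 1 < PySem.Int.mod i n + 1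
  then PySem.Int.mod i n + 1 else PySem.Int.floordiv i n + 1

-- the row segment B emits for row r
def rowB (n left right r : Int) : List Int :=
  List.replicate
      (min (if r = PySem.Int.floordiv right n then PySem.Int.mod right n else n - 1) r -
        (if r = PySem.Int.floordiv left n then PySem.Int.mod left n else 0) + 1).toNat (r + 1) ++
    PySem.List.pyRange
      (max (if r = PySem.Int.floordiv left n then PySem.Int.mod left n else 0) (r + 1) + 1)
      ((if r = PySem.Int.floordiv right n then PySem.Int.mod right n else n - 1) + 2) 1

lemma foldl_ext {α β : Type} (f g : α → β → α) (h : ∀ a b, f a b = g a b)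
    (xs : List β) (init : α) : xs.foldl f init = xs.foldl g init := by
  have : f = g := funext fun a => funext fun b => h a b
  rw [this]

lemma foldl_snoc (g : Int → List Int) :
    ∀ (xs : List Int) (init : List Int),
      xs.foldl (fun a i => a ++ g i) init = init ++ (xs.map g).flatten := by
  intro xs
  induction xs with
  | nil => intro init; simp
  | cons x xs ih => intro init; simp [List.foldl_cons, ih]

lemma solution_eq_map (n l r : Int) :
    solution n l r = (PySem.List.pyRange l (r + 1) 1).map (fA n) := by
  simp only [solution]
  rw [foldl_ext _ (fun a i => a ++ [fA n i])
    (by intro a i; simp only [fA]; split <;> rfl)]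
  rw [foldl_snoc (fun i => [fA n i])]
  rw [List.nil_append, ← List.flatMap_def]
  induction (PySem.List.pyRange l (r + 1) 1) with
  | nil => rfl
  | cons x xs ih => simp [ih]

lemma solution_alt_eq_rows (n l r : Int) :
    solution_alt n l r
      = ((PySem.List.pyRange (PySem.Int.floordiv l n) (PySem.Int.floordiv r n + 1) 1).map
          (rowB n l r)).flatten := by
  simp only [solution_alt]
  rw [foldl_ext _ (fun a rr => a ++ rowB n l r rr)
    (by intro a rr; simp only [rowB]; rw [List.append_assoc])]
  rw [foldl_snoc (rowB n l r), List.nil_append]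

lemma fd_row (n r c : Int) (hn : 0 < n) (h0 : 0 ≤ c) (h1 : c < n) :
    PySem.Int.floordiv (r * n + c) n = r := by
  rw [PySem.Int.floordiv_eq_ediv_of_pos hn]
  rw [show r * n + c = c + r * n by ring]
  rw [Int.add_mul_ediv_right _ _ (by omega : n ≠ 0)]
  rw [Int.ediv_eq_zero_of_lt h0 h1]
  ring

lemma md_row (n r c : Int) (hn : 0 < n) (h0 : 0 ≤ c) (h1 : c < n) :
    PySem.Int.mod (r * n + c) n = c := by
  rw [PySem.Int.mod_eq_emod_of_pos hn]
  rw [show r * n + c = c + r * n by ring]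
  rw [Int.add_mul_emod_self_right]
  exact Int.emod_eq_of_lt h0 h1

lemma fA_row (n r i : Int) (hn : 0 < n) (h0 : n * r ≤ i) (h1 : i < n * r + n) :
    fA n i = if r < i - n * r then i - n * r + 1 else r + 1 := by
  have hfd := fd_row n r (i - n * r) hn (by omega) (by omega)
  have hmd := md_row n r (i - n * r) hn (by omega) (by omega)
  rw [show r * n + (i - n * r) = i by ring] at hfd hmd
  simp only [fA, hfd, hmd]
  split <;> split <;> omega

-- map of a constant-valued function over a range is replicate
lemma map_range_const (g : Int → Int) (a b v : Int)
    (h : ∀ i, a ≤ i → i < b → g i = v) :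
    (PySem.List.pyRange a b 1).map g = List.replicate (b - a).toNat v := by
  rw [PySem.List.pyRange_one, List.map_map]
  have hc : ∀ k ∈ List.range (b - a).toNat, (g ∘ fun k : Nat => a + (k : Int)) k = v := by
    intro k hk
    simp only [List.mem_range] at hk
    simp only [Function.comp_apply]
    exact h (a + k) (by omega) (by omega)
  rw [List.map_congr_left hc, List.map_const', List.length_range]

-- map of a shifted-successor function over a range is a shifted range
lemma map_range_shift (g : Int → Int) (a b s : Int)
    (h : ∀ i, a ≤ i → i < b → g i = i - s + 1) :
    (PySem.List.pyRange a b 1).map g = PySem.List.pyRange (a - s + 1) (b - s + 1) 1 := by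
  rw [PySem.List.pyRange_one, PySem.List.pyRange_one, List.map_map]
  rw [show (b - s + 1 - (a - s + 1)).toNat = (b - a).toNat by omega]
  apply List.map_congr_left
  intro k hk
  simp only [List.mem_range] at hk
  simp only [Function.comp_apply]
  rw [h (a + k) (by omega) (by omega)]
  omega

-- one row: B's segment shape equals A's values over the row's index window
lemma rowEq (n r lo hi : Int) (hn : 0 < n) (hlo : 0 ≤ lo) (hhi : hi < n) :
    List.replicate (min hi r - lo + 1).toNat (r + 1) ++
        PySem.List.pyRange (max lo (r + 1) + 1) (hi + 2) 1
      = (PySem.List.pyRange (n * r + lo) (n * r + hi + 1) 1).map (fA n) := by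
  by_cases hle : lo ≤ hi
  · by_cases hr1 : r < lo
    · -- constant block empty, whole window ascending
      have h1 : min hi r ≤ r := min_le_right _ _
      rw [show (min hi r - lo + 1).toNat = 0 by omega, List.replicate_zero, List.nil_append]
      rw [max_eq_left (by omega : r + 1 ≤ lo)]
      rw [map_range_shift (fA n) _ _ (n * r)
        (fun i hi1 hi2 => by
          rw [fA_row n r i hn (by omega) (by omega), if_pos (by omega)])]
      congr 1 <;> ring
    · by_cases hr2 : r ≤ hi
      · -- two segments: constant then ascending, split at column r + 1
        rw [min_eq_right hr2, max_eq_right (by omega : lo ≤ r + 1)]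
        rw [PySem.List.pyRange_one_append (n * r + lo) (n * r + (r + 1)) (n * r + hi + 1)
          (by omega) (by omega), List.map_append]
        congr 1
        · rw [map_range_const (fA n) _ _ (r + 1)
            (fun i h1 h2 => by
              rw [fA_row n r i hn (by omega) (by omega), if_neg (by omega)])]
          congr 1
          omega
        · rw [map_range_shift (fA n) _ _ (n * r)
            (fun i h1 h2 => by
              rw [fA_row n r i hn (by omega) (by omega), if_pos (by omega)])]
          congr 1 <;> ring
      · -- ascending part empty, whole window constant
        have hmax : r + 1 ≤ max lo (r + 1) := le_max_right _ _
        rw [min_eq_left (by omega : hi ≤ r)]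
        rw [PySem.List.pyRange_one_eq_nil (by omega : hi + 2 ≤ max lo (r + 1) + 1),
          List.append_nil]
        rw [map_range_const (fA n) _ _ (r + 1)
          (fun i h1 h2 => by
            rw [fA_row n r i hn (by omega) (by omega), if_neg (by omega)])]
        congr 1
        omega
  · -- empty window: both sides nil
    have hm : r + 1 ≤ max lo (r + 1) := le_max_right _ _
    have hm2 : lo ≤ max lo (r + 1) := le_max_left _ _
    have hmin1 : min hi r ≤ hi := min_le_left _ _
    rw [show (min hi r - lo + 1).toNat = 0 by omega, List.replicate_zero, List.nil_append]
    rw [PySem.List.pyRange_one_eq_nil (by omega : hi + 2 ≤ max lo (r + 1) + 1)]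
    rw [PySem.List.pyRange_one_eq_nil (by omega : n * r + hi + 1 ≤ n * r + lo), List.map_nil]

-- main induction over the number of rows
lemma rows_eq (n : Int) (hn : 0 < n) :
    ∀ (k : Nat) (l r : Int),
      PySem.Int.floordiv r n = PySem.Int.floordiv l n + (k : Int) →
      ((PySem.List.pyRange (PySem.Int.floordiv l n) (PySem.Int.floordiv r n + 1) 1).map
          (rowB n l r)).flatten
        = (PySem.List.pyRange l (r + 1) 1).map (fA n) := by
  intro k
  induction k with
  | zero =>
    intro l r hk
    have hk' : PySem.Int.floordiv r n = PySem.Int.floordiv l n := by simpa using hk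
    have hl := PySem.Int.floordiv_mul_add_mod l n
    have hr := PySem.Int.floordiv_mul_add_mod r n
    have hmlb := PySem.Int.mod_nonneg l hn
    have hmrt := PySem.Int.mod_lt r hn
    rw [hk', PySem.List.pyRange_one_singleton]
    simp only [List.map_cons, List.map_nil, List.flatten_cons, List.flatten_nil, List.append_nil]
    unfold rowB
    rw [hk']
    simp only [if_true]
    rw [rowEq n (PySem.Int.floordiv l n) (PySem.Int.mod l n) (PySem.Int.mod r n) hn hmlb
      (by omega)]
    rw [hk'] at hr
    rw [show n * PySem.Int.floordiv l n + PySem.Int.mod l n = l by linear_combination hl,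
      show n * PySem.Int.floordiv l n + PySem.Int.mod r n + 1 = r + 1 by linear_combination hr]
  | succ k ih =>
    intro l r hk
    have hl := PySem.Int.floordiv_mul_add_mod l n
    have hr := PySem.Int.floordiv_mul_add_mod r n
    have hmlb := PySem.Int.mod_nonneg l hn
    have hmlt := PySem.Int.mod_lt l hn
    have hmrb := PySem.Int.mod_nonneg r hn
    have hfl' : PySem.Int.floordiv ((PySem.Int.floordiv l n + 1) * n) n
        = PySem.Int.floordiv l n + 1 := by
      have h := fd_row n (PySem.Int.floordiv l n + 1) 0 hn le_rfl hn
      rwa [add_zero] at h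
    have hml' : PySem.Int.mod ((PySem.Int.floordiv l n + 1) * n) n = 0 := by
      have h := md_row n (PySem.Int.floordiv l n + 1) 0 hn le_rfl hn
      rwa [add_zero] at h
    have hexp : (PySem.Int.floordiv l n + 1) * n = PySem.Int.floordiv l n * n + n := by ring
    have hll' : l ≤ (PySem.Int.floordiv l n + 1) * n := by omega
    have hl'r : (PySem.Int.floordiv l n + 1) * n ≤ r + 1 := by
      have h2 : (PySem.Int.floordiv l n + 1) * n ≤ PySem.Int.floordiv r n * n :=
        mul_le_mul_of_nonneg_right (by omega) (le_of_lt hn)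
      omega
    rw [PySem.List.pyRange_one_cons
      (by omega : PySem.Int.floordiv l n < PySem.Int.floordiv r n + 1)]
    simp only [List.map_cons, List.flatten_cons]
    -- on the remaining rows, rowB for (l, r) coincides with rowB for (l', r), l' the next row start
    have htail : ∀ rr ∈ PySem.List.pyRange (PySem.Int.floordiv l n + 1)
        (PySem.Int.floordiv r n + 1) 1,
        rowB n l r rr = rowB n ((PySem.Int.floordiv l n + 1) * n) r rr := by
      intro rr hrr
      rw [PySem.List.mem_pyRange_one] at hrr
      unfold rowB
      rw [hfl', hml']
      rw [if_neg (by omega : ¬ rr = PySem.Int.floordiv l n)]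
      by_cases hc : rr = PySem.Int.floordiv l n + 1
      · rw [if_pos hc]
      · rw [if_neg hc]
    rw [List.map_congr_left htail]
    have hih := ih ((PySem.Int.floordiv l n + 1) * n) r (by rw [hfl']; omega)
    rw [hfl'] at hih
    rw [hih]
    -- the first (possibly partial) row
    have hfirst : rowB n l r (PySem.Int.floordiv l n)
        = (PySem.List.pyRange l ((PySem.Int.floordiv l n + 1) * n) 1).map (fA n) := by
      unfold rowB
      rw [if_neg (by omega : ¬ PySem.Int.floordiv l n = PySem.Int.floordiv r n), if_pos rfl]
      rw [rowEq n (PySem.Int.floordiv l n) (PySem.Int.mod l n) (n - 1) hn hmlb (by omega)]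
      rw [show n * PySem.Int.floordiv l n + PySem.Int.mod l n = l by linear_combination hl,
        show n * PySem.Int.floordiv l n + (n - 1) + 1 = (PySem.Int.floordiv l n + 1) * n by ring]
    rw [hfirst, ← List.map_append,
      ← PySem.List.pyRange_one_append l ((PySem.Int.floordiv l n + 1) * n) (r + 1) hll' hl'r]

-- ===== VERDICT (by name: the statement is the Claim_ definition above) =====
theorem solution_spec : Claim_equal_solution := by
  intro n l r _ hpre
  have hn : 0 < n := hpre
  unfold Spec_solution
  rw [solution_eq_map, solution_alt_eq_rows]
  by_cases h : PySem.Int.floordiv l n ≤ PySem.Int.floordiv r n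
  · obtain ⟨k, hk⟩ := Int.le.dest h
    exact (rows_eq n hn k l r (by omega)).symm
  · -- no rows at all: then l > r and both sides are empty
    push Not at h
    have hl := PySem.Int.floordiv_mul_add_mod l n
    have hr := PySem.Int.floordiv_mul_add_mod r n
    have hmlt := PySem.Int.mod_lt l hn
    have hmlb := PySem.Int.mod_nonneg l hn
    have hmrb := PySem.Int.mod_nonneg r hn
    have hmrt := PySem.Int.mod_lt r hn
    have h2 : (PySem.Int.floordiv r n + 1) * n ≤ PySem.Int.floordiv l n * n :=
      mul_le_mul_of_nonneg_right (by omega) (le_of_lt hn)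
    have hexp : (PySem.Int.floordiv r n + 1) * n = PySem.Int.floordiv r n * n + n := by ring
    have hlr : r + 1 ≤ l := by omega
    rw [PySem.List.pyRange_one_eq_nil hlr,
      PySem.List.pyRange_one_eq_nil (by omega : PySem.Int.floordiv r n + 1 ≤ PySem.Int.floordiv l n)]
    simp
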